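-- pv_equiv track=rewrite | github.com/nova-rey/Crapssim-control | crapssim_control/controller.py | _split_switch_setvar_other
-- ===== SOURCE A (Python) =====
-- from typing import Any, Deque, Dict, List, Optional, Tuple
--
-- def _split_switch_setvar_other(actions: List[Dict[str, Any]]) -> Tuple[List[Dict[str, Any]], List[Dict[str, Any]], List[Dict[str, Any]]]:
--     switches: List[Dict[str, Any]] = []
--     setvars: List[Dict[str, Any]] = []
--     others: List[Dict[str, Any]] = []
--     for a in actions:
--         act = (a.get("action") or "").lower()
--         if act == "switch_mode":
--             switches.append(a)
--         elif act == "setvar":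
--             setvars.append(a)
--         else:
--             others.append(a)
--     return switches, setvars, others
-- ===== SOURCE B (Python) =====
-- def _split_switch_setvar_other(actions):
--     def rank(a):
--         act = (a.get("action") or "").lower()
--         if act == "switch_mode":
--             return 0
--         if act == "setvar":
--             return 1
--         return 2
--     ordered = sorted(actions, key=rank)
--     n0 = sum(1 for a in actions if rank(a) == 0)
--     n1 = sum(1 for a in actions if rank(a) == 1)
--     return ordered[:n0], ordered[n0:n0 + n1], ordered[n0 + n1:]
-- ===== Notes on version B (the rewrite author's own statement) =====
-- stated objective: alternative
-- what changed: Instead of growing three lists in one classifying loop, B maps each action to a numeric rank, stably sorts the whole list by that rank, counts the first two categories, and slices the sorted list into the three parts (sort-then-slice instead of partition-by-append).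
import Mathlib
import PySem

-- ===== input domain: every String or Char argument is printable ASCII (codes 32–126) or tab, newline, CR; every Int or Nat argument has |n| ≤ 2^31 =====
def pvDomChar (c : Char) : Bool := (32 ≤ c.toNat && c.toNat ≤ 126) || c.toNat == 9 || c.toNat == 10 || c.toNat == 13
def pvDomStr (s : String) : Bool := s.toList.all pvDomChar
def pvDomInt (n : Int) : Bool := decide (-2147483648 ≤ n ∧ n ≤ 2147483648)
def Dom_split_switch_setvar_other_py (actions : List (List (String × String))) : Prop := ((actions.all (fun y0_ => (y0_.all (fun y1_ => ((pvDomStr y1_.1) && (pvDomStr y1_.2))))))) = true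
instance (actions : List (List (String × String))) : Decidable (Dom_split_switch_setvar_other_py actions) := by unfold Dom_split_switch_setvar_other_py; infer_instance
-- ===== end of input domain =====

-- B replaces the partition-by-append loop with rank-tagging, a stable sort by rank, and slicing (alternative algorithm); same values proved equal.

-- ===== PORT A =====
-- act = (a.get("action") or "").lower()  — exact: '' or '' = '', so getD "" then lower
def pvAct (a : List (String × String)) : String :=
  PySem.Str.lower (((PySem.Dict.mk a).get? "action").getD "")

def split_switch_setvar_other_py (actions : List (List (String × String))) : (List (List (String × String))) × (List (List (String × String))) × (List (List (String × String))) :=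
  let r := actions.foldl (fun (acc : List (List (String × String)) × List (List (String × String)) × List (List (String × String))) a =>
    let act := pvAct a
    if act = "switch_mode" then (acc.1 ++ [a], acc.2.1, acc.2.2)
    else if act = "setvar" then (acc.1, acc.2.1 ++ [a], acc.2.2)
    else (acc.1, acc.2.1, acc.2.2 ++ [a])) ([], [], [])
  r

-- ===== PORT B =====
def pvRank (a : List (String × String)) : Nat :=
  if PySem.Str.lower (((PySem.Dict.mk a).get? "action").getD "") = "switch_mode" then 0
  else if PySem.Str.lower (((PySem.Dict.mk a).get? "action").getD "") = "setvar" then 1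
  else 2

def split_switch_setvar_other_py_alt (actions : List (List (String × String))) : (List (List (String × String))) × (List (List (String × String))) × (List (List (String × String))) :=
  let ordered := PySem.List.sorted actions (fun a => pvRank a)
  let n0 : Int := actions.foldl (fun (s : Int) a => if pvRank a = 0 then s + 1 else s) 0
  let n1 : Int := actions.foldl (fun (s : Int) a => if pvRank a = 1 then s + 1 else s) 0
  (PySem.List.slice ordered none (some n0),
   PySem.List.slice ordered (some n0) (some (n0 + n1)),
   PySem.List.slice ordered (some (n0 + n1)) none)

-- ===== PRECONDITION & SPEC =====
def Spec_split_switch_setvar_other_py (actions : List (List (String × String))) (out : (List (List (String × String))) × (List (List (String × String))) × (List (List (String × String)))) : Prop := out = split_switch_setvar_other_py_alt actions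
instance (actions : List (List (String × String))) (out : (List (List (String × String))) × (List (List (String × String))) × (List (List (String × String)))) : Decidable (Spec_split_switch_setvar_other_py actions out) := by unfold Spec_split_switch_setvar_other_py; infer_instance

-- ===== CLAIM =====
def Claim_equal_split_switch_setvar_other_py : Prop := ∀ (actions : List (List (String × String))), Dom_split_switch_setvar_other_py actions → Spec_split_switch_setvar_other_py actions (split_switch_setvar_other_py actions)

-- ===== LEMMAS AND PROOFS =====

theorem insertBy_append_left {α : Type} (before : α → α → Bool) (x : α) (A R : List α)
    (hA : ∀ y ∈ A, before x y = false) :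
    PySem.List.insertBy before x (A ++ R) = A ++ PySem.List.insertBy before x R := by
  induction A with
  | nil => simp
  | cons a t ih =>
    have ha := hA a (by simp)
    simp only [List.cons_append, PySem.List.insertBy, ha]
    simp [ih (fun y hy => hA y (by simp [hy]))]

theorem insertBy_all_before {α : Type} (before : α → α → Bool) (x : α) (R : List α)
    (hR : ∀ y ∈ R, before x y = true) :
    PySem.List.insertBy before x R = x :: R := by
  cases R with
  | nil => rfl
  | cons r t => simp [PySem.List.insertBy, hR r (by simp)]

-- filters by rank
def pvF (k : Nat) (xs : List (List (String × String))) : List (List (String × String)) :=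
  xs.filter (fun a => pvRank a = k)

theorem rank_le_two (a : List (String × String)) : pvRank a ≤ 2 := by
  unfold pvRank; split_ifs <;> omega

theorem sorted_eq_filters (actions : List (List (String × String))) :
    PySem.List.sorted actions (fun a => pvRank a) = pvF 0 actions ++ pvF 1 actions ++ pvF 2 actions := by
  rw [PySem.List.sorted_eq_foldl_insertBy]
  suffices h : ∀ (xs A B C : List (List (String × String))),
      (∀ y ∈ A, pvRank y = 0) → (∀ y ∈ B, pvRank y = 1) → (∀ y ∈ C, pvRank y = 2) →
      xs.foldl (fun acc x => PySem.List.insertBy (fun a b => decide (pvRank a < pvRank b)) x acc) (A ++ B ++ C)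
        = (A ++ pvF 0 xs) ++ (B ++ pvF 1 xs) ++ (C ++ pvF 2 xs) by
    simpa using h actions [] [] [] (by simp) (by simp) (by simp)
  intro xs
  induction xs with
  | nil => intro A B C _ _ _; simp [pvF]
  | cons x t ih =>
    intro A B C hA hB hC
    simp only [List.foldl_cons]
    have hx := rank_le_two x
    rcases Nat.lt_or_ge (pvRank x) 1 with h0 | h1
    · have hx0 : pvRank x = 0 := by omega
      have : PySem.List.insertBy (fun a b => decide (pvRank a < pvRank b)) x (A ++ B ++ C)
          = (A ++ [x]) ++ B ++ C := by
        rw [List.append_assoc, insertBy_append_left _ _ A (B ++ C)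
          (fun y hy => by simp [hx0, hA y hy]),
          insertBy_all_before _ _ (B ++ C) (fun y hy => by
            rcases List.mem_append.1 hy with h | h
            · simp [hx0, hB y h]
            · simp [hx0, hC y h])]
        simp
      have hA' : ∀ y ∈ A ++ [x], pvRank y = 0 := by
        intro y hy
        rcases List.mem_append.1 hy with h | h
        · exact hA y h
        · simp at h; subst h; exact hx0
      rw [this, ih (A ++ [x]) B C hA' hB hC]
      simp [pvF, hx0]
    rcases Nat.lt_or_ge (pvRank x) 2 with h1' | h2
    · have hx1 : pvRank x = 1 := by omega
      have : PySem.List.insertBy (fun a b => decide (pvRank a < pvRank b)) x (A ++ B ++ C)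
          = A ++ (B ++ [x]) ++ C := by
        rw [List.append_assoc, insertBy_append_left _ _ A (B ++ C)
          (fun y hy => by simp [hx1, hA y hy]),
          insertBy_append_left _ _ B C (fun y hy => by simp [hx1, hB y hy]),
          insertBy_all_before _ _ C (fun y hy => by simp [hx1, hC y hy])]
        simp
      have hB' : ∀ y ∈ B ++ [x], pvRank y = 1 := by
        intro y hy
        rcases List.mem_append.1 hy with h | h
        · exact hB y h
        · simp at h; subst h; exact hx1
      rw [this, ih A (B ++ [x]) C hA hB' hC]
      simp [pvF, hx1]
    · have hx2 : pvRank x = 2 := by omega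
      have : PySem.List.insertBy (fun a b => decide (pvRank a < pvRank b)) x (A ++ B ++ C)
          = A ++ B ++ (C ++ [x]) := by
        rw [PySem.List.insertBy_of_forall_not_before _ _ _ (fun y hy => by
          rcases List.mem_append.1 hy with h | h
          · rcases List.mem_append.1 h with h' | h'
            · simp [hx2, hA y h']
            · simp [hx2, hB y h']
          · simp [hx2, hC y h])]
        simp
      have hC' : ∀ y ∈ C ++ [x], pvRank y = 2 := by
        intro y hy
        rcases List.mem_append.1 hy with h | h
        · exact hC y h
        · simp at h; subst h; exact hx2
      rw [this, ih A B (C ++ [x]) hA hB hC']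
      simp [pvF, hx2]

theorem count_fold_eq (k : Nat) (xs : List (List (String × String))) :
    xs.foldl (fun (s : Int) a => if pvRank a = k then s + 1 else s) 0 = ((pvF k xs).length : Int) := by
  suffices h : ∀ (s : Int), xs.foldl (fun (s : Int) a => if pvRank a = k then s + 1 else s) s
      = s + ((pvF k xs).length : Int) by simpa using h 0
  induction xs with
  | nil => intro s; simp [pvF]
  | cons x t ih =>
    intro s
    simp only [List.foldl_cons, pvF, List.filter_cons]
    by_cases hx : pvRank x = k
    · simp only [hx]
      rw [ih]
      simp [pvF]
      omega
    · simp only [if_neg hx, decide_eq_true_eq]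
      rw [ih]
      simp [pvF, hx]

-- A's fold equals the three filters
theorem a_eq_filters (actions : List (List (String × String))) :
    split_switch_setvar_other_py actions = (pvF 0 actions, pvF 1 actions, pvF 2 actions) := by
  unfold split_switch_setvar_other_py
  suffices h : ∀ (xs : List (List (String × String))) (s v o : List (List (String × String))),
      xs.foldl (fun (acc : List (List (String × String)) × List (List (String × String)) × List (List (String × String))) a =>
        let act := pvAct a
        if act = "switch_mode" then (acc.1 ++ [a], acc.2.1, acc.2.2)
        else if act = "setvar" then (acc.1, acc.2.1 ++ [a], acc.2.2)
        else (acc.1, acc.2.1, acc.2.2 ++ [a])) (s, v, o)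
      = (s ++ pvF 0 xs, v ++ pvF 1 xs, o ++ pvF 2 xs) by
    simpa using h actions [] [] []
  intro xs
  induction xs with
  | nil => intro s v o; simp [pvF]
  | cons a t ih =>
    intro s v o
    simp only [List.foldl_cons, pvF, List.filter_cons]
    by_cases h1 : pvAct a = "switch_mode"
    · have hr : pvRank a = 0 := by simp [pvRank, pvAct] at h1 ⊢; simp [h1]
      simp only [h1]
      rw [ih]
      simp [pvF, hr]
    · by_cases h2 : pvAct a = "setvar"
      · have hr : pvRank a = 1 := by
          simp [pvRank, pvAct] at h1 h2 ⊢; simp [h2]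
        simp only [h2, if_neg h1]
        rw [ih]; simp [pvF, hr]
      · have hr : pvRank a = 2 := by
          simp [pvRank, pvAct] at h1 h2 ⊢; simp [h1, h2]
        simp only [if_neg h1, if_neg h2]
        rw [ih]; simp [pvF, hr]

-- ===== VERDICT =====
theorem split_switch_setvar_other_py_spec : Claim_equal_split_switch_setvar_other_py := by
  intro actions _
  unfold Spec_split_switch_setvar_other_py split_switch_setvar_other_py_alt
  rw [a_eq_filters, sorted_eq_filters, count_fold_eq, count_fold_eq]
  dsimp only
  have e01 : ((pvF 0 actions).length : Int) + ((pvF 1 actions).length : Int)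
      = (((pvF 0 actions).length + (pvF 1 actions).length : Nat) : Int) := by push_cast; ring
  rw [e01, PySem.List.slice_to_natCast, PySem.List.slice_from_natCast]
  rw [show (((pvF 0 actions).length : Nat) : Int) = ((pvF 0 actions).length : Int) from rfl]
  rw [PySem.List.slice_natCast]
  simp [List.drop_append, List.append_assoc]
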